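-- pv_equiv track=rewrite | github.com/nurligenov/tiktokparser | tiktokaggregator/tasks.py | chunked_generator
-- ===== SOURCE A (Python) =====
-- def chunked_generator(generator, chunk_size):
--     """Yield successive chunks from the generator."""
--     chunk = []
--     for item in generator:
--         chunk.append(item)
--         if len(chunk) >= chunk_size:
--             yield chunk
--             chunk = []
--     if chunk:
--         yield chunk
-- ===== SOURCE B (Python) =====
-- from itertools import islice
--
--
-- def chunked_generator(generator, chunk_size):
--     """Yield successive chunks from the generator."""
--     it = iter(generator)
--     while True:
--         chunk = list(islice(it, chunk_size))
--         if not chunk: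
--             return
--         yield chunk
-- ===== Notes on version B (the rewrite author's own statement) =====
-- stated objective: idiomatic
-- what changed: Replaces the per-item append-and-count loop with an explicit iterator and repeated bulk islice pulls of chunk_size items, yielding each slice until it comes back empty.
-- outside the precondition, e.g. on chunked_generator([1, 2], 0): A returns [[1], [2]], B returns []; on chunked_generator([1, 2], -1): A returns [[1], [2]], B raises ValueError
import Mathlib
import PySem

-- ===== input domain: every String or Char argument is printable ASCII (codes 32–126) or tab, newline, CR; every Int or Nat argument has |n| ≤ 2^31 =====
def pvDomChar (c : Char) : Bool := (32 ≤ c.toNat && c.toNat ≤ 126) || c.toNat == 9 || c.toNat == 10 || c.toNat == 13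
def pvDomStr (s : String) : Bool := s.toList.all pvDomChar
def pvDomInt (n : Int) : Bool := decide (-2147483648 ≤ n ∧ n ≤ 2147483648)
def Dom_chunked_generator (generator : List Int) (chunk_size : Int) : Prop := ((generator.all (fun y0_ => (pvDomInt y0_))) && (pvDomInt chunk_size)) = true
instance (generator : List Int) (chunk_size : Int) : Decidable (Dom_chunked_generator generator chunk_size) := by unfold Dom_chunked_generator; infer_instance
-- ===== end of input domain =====

-- B replaces A's per-item append-and-count loop with repeated bulk slices of chunk_size
-- items from an explicit iterator (more idiomatic); equal on Pre_ (chunk_size ≥ 1).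


-- ===== PORT A =====
-- A: fold over the items, appending to `chunk`, emitting it whenever len(chunk) >= chunk_size,
-- then flushing the non-empty remainder.
def chunked_generator (generator : List Int) (chunk_size : Int) : List (List Int) :=
  let st := generator.foldl
    (fun (st : List (List Int) × List Int) item =>
      let chunk := st.2 ++ [item]
      if (chunk.length : Int) ≥ chunk_size then (st.1 ++ [chunk], []) else (st.1, chunk))
    ([], [])
  if st.2 ≠ [] then st.1 ++ [st.2] else st.1

-- ===== PORT B =====
-- B: repeatedly pull a slice of chunk_size items (islice) from the front; stop on an empty pull.
def chunkPulls (generator : List Int) (n : Nat) : List (List Int) :=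
  if h : generator.take n = [] then []
  else generator.take n :: chunkPulls (generator.drop n) n
termination_by generator.length
decreasing_by
  simp only [List.take_eq_nil_iff, not_or] at h
  have hg : 0 < generator.length := List.length_pos_of_ne_nil h.2
  have hn : 0 < n := Nat.pos_of_ne_zero h.1
  simp only [List.length_drop]
  omega

def chunked_generator_alt (generator : List Int) (chunk_size : Int) : List (List Int) :=
  chunkPulls generator chunk_size.toNat

-- ===== PRECONDITION & SPEC =====
-- Pre_ excludes chunk_size ≤ 0: there A's `len(chunk) >= chunk_size` test is vacuously true and
-- it emits singleton chunks — an accident of the comparison — while B's islice yields nothing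
-- (chunk_size = 0) or raises ValueError (chunk_size < 0).
def Pre_chunked_generator (generator : List Int) (chunk_size : Int) : Prop := 1 ≤ chunk_size
instance (generator : List Int) (chunk_size : Int) : Decidable (Pre_chunked_generator generator chunk_size) := by unfold Pre_chunked_generator; infer_instance
def pvWitness_chunked_generator : List Int × Int := ([1, 2, 3], 2)
def Spec_chunked_generator (generator : List Int) (chunk_size : Int) (out : List (List Int)) : Prop := out = chunked_generator_alt generator chunk_size
instance (generator : List Int) (chunk_size : Int) (out : List (List Int)) : Decidable (Spec_chunked_generator generator chunk_size out) := by unfold Spec_chunked_generator; infer_instance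

-- ===== CLAIM (what is proved, stated in full; the proofs are below) =====
def Claim_equal_chunked_generator : Prop := ∀ (generator : List Int) (chunk_size : Int), Dom_chunked_generator generator chunk_size → Pre_chunked_generator generator chunk_size → Spec_chunked_generator generator chunk_size (chunked_generator generator chunk_size)

-- ===== LEMMAS AND PROOFS =====

-- The fold from state (acc, chunk) with chunk a partial chunk (shorter than n) finalizes to
-- acc followed by the bulk-slice chunking of chunk ++ rest.
theorem loop_eq (n : Nat) (hn : 1 ≤ n) (cs : Int) (hcs : cs = (n : Int)) :
    ∀ (g : List Int) (acc : List (List Int)) (chunk : List Int), chunk.length < n →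
    (let st := g.foldl
        (fun (st : List (List Int) × List Int) item =>
          let c := st.2 ++ [item]
          if (c.length : Int) ≥ cs then (st.1 ++ [c], []) else (st.1, c))
        (acc, chunk)
     if st.2 ≠ [] then st.1 ++ [st.2] else st.1) = acc ++ chunkPulls (chunk ++ g) n := by
  intro g
  induction g with
  | nil =>
    intro acc chunk hlt
    simp only [List.foldl_nil, List.append_nil]
    rw [chunkPulls]
    by_cases hc : chunk = []
    · subst hc; simp
    · have ht : chunk.take n = chunk := List.take_of_length_le (le_of_lt hlt)
      rw [dif_neg (by rw [ht]; exact hc), ht]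
      have hd : chunk.drop n = [] := List.drop_eq_nil_of_le (le_of_lt hlt)
      rw [hd, chunkPulls]
      simp [hc]
  | cons x rest ih =>
    intro acc chunk hlt
    simp only [List.foldl_cons]
    by_cases hge : ((chunk ++ [x]).length : Int) ≥ cs
    · have hlen : (chunk ++ [x]).length = n := by
        simp only [List.length_append, List.length_singleton] at hge ⊢
        omega
      simp only [hge, if_pos]
      rw [ih (acc ++ [chunk ++ [x]]) [] (by simp only [List.length_nil]; omega)]
      have hassoc : chunk ++ x :: rest = (chunk ++ [x]) ++ rest := by simp
      have htake : ((chunk ++ [x]) ++ rest).take n = chunk ++ [x] := by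
        rw [← hlen, List.take_left]
      have hdrop : ((chunk ++ [x]) ++ rest).drop n = rest := by
        rw [← hlen, List.drop_left]
      have hne : (chunk ++ [x]) ≠ [] := by simp
      rw [hassoc]
      conv_rhs => rw [chunkPulls]
      rw [dif_neg (by rw [htake]; exact hne), htake, hdrop]
      simp
    · have hlen : (chunk ++ [x]).length < n := by
        simp only [List.length_append, List.length_singleton] at hge ⊢
        omega
      simp only [hge, if_false]
      rw [ih acc (chunk ++ [x]) hlen]
      simp

-- ===== VERDICT (by name: the statement is the Claim_ definition above) =====
theorem chunked_generator_spec : Claim_equal_chunked_generator := by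
  intro g cs _ hpre
  unfold Spec_chunked_generator chunked_generator chunked_generator_alt
  have hn : 1 ≤ cs.toNat := by unfold Pre_chunked_generator at hpre; omega
  have hcs : cs = (cs.toNat : Int) := by unfold Pre_chunked_generator at hpre; omega
  have := loop_eq cs.toNat hn cs hcs g [] [] (by simp only [List.length_nil]; omega)
  simpa using this
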